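-- pv_equiv track=rewrite | github.com/anhhai680/knowledge-graph-agent | src/workflows/generic_qa_workflow.py | _detect_api_patterns
-- ===== SOURCE A (Python) =====
-- from typing import Any, Dict, List, Optional
--
-- def _detect_api_patterns(endpoints: List[Dict[str, str]]) -> List[str]:
--     """Detect API design patterns from endpoints."""
--     patterns = []
--
--     if not endpoints:
--         return patterns
--
--     # Check for RESTful patterns
--     methods = [ep.get("method", "") for ep in endpoints]
--     if any(method in methods for method in ["GET", "POST", "PUT", "DELETE"]):
--         patterns.append("RESTful API")
--
--     # Check for CRUD patterns
--     paths = [ep.get("path", "") for ep in endpoints]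
--     if any("/{id}" in path for path in paths):
--         patterns.append("CRUD Operations")
--
--     # Check for versioning
--     if any("/v1/" in path or "/api/" in path for path in paths):
--         patterns.append("API Versioning")
--
--     return patterns
-- ===== SOURCE B (Python) =====
-- from typing import Any, Dict, List, Optional
--
-- def _detect_api_patterns(endpoints: List[Dict[str, str]]) -> List[str]:
--     """Detect API design patterns from endpoints (single pass with flags)."""
--     has_rest = False
--     has_crud = False
--     has_version = False
--     for ep in endpoints:
--         method = ep.get("method", "")
--         path = ep.get("path", "")
--         if method == "GET" or method == "POST" or method == "PUT" or method == "DELETE":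
--             has_rest = True
--         if "/{id}" in path:
--             has_crud = True
--         if "/v1/" in path or "/api/" in path:
--             has_version = True
--     patterns = []
--     if has_rest:
--         patterns.append("RESTful API")
--     if has_crud:
--         patterns.append("CRUD Operations")
--     if has_version:
--         patterns.append("API Versioning")
--     return patterns
-- ===== Notes on version B (the rewrite author's own statement) =====
-- stated objective: simpler
-- what changed: Replaced the three separate list-builds/any() scans (plus the empty-list early return) with one loop over endpoints maintaining three boolean flags, appending the pattern names after the loop.
import Mathlib
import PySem

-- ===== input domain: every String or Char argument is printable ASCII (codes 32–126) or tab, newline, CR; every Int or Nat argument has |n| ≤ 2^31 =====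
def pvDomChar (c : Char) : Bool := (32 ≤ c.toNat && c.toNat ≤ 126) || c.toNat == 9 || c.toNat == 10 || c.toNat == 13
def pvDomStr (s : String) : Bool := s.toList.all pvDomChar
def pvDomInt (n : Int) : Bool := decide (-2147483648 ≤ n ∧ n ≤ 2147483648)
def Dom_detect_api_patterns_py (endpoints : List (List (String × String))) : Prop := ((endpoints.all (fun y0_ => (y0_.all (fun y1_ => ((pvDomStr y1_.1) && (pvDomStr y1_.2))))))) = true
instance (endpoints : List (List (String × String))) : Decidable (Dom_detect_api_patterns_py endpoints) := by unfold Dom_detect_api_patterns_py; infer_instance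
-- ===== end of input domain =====

-- One honest line: B replaces A's three separate list-builds and any() scans with a
-- single traversal maintaining three boolean flags (objective: simpler).

-- ===== PORT A =====
def detect_api_patterns_py (endpoints : List (List (String × String))) : List String :=
  let patterns : List String := []
  if endpoints = [] then patterns
  else
    let methods := endpoints.map (fun ep => PySem.Dict.getD (PySem.Dict.mk ep) "method" "")
    let patterns := if (["GET", "POST", "PUT", "DELETE"].any (fun m => methods.contains m))
      then patterns ++ ["RESTful API"] else patterns
    let paths := endpoints.map (fun ep => PySem.Dict.getD (PySem.Dict.mk ep) "path" "")
    let patterns := if paths.any (fun p => PySem.Str.isIn "/{id}" p)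
      then patterns ++ ["CRUD Operations"] else patterns
    let patterns := if paths.any (fun p => PySem.Str.isIn "/v1/" p || PySem.Str.isIn "/api/" p)
      then patterns ++ ["API Versioning"] else patterns
    patterns

-- ===== PORT B =====
def detect_api_patterns_py_alt (endpoints : List (List (String × String))) : List String :=
  let flags := endpoints.foldl
    (fun (acc : Bool × Bool × Bool) ep =>
      let method := PySem.Dict.getD (PySem.Dict.mk ep) "method" ""
      let path := PySem.Dict.getD (PySem.Dict.mk ep) "path" ""
      ((if method == "GET" || method == "POST" || method == "PUT" || method == "DELETE"
          then true else acc.1),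
       (if PySem.Str.isIn "/{id}" path then true else acc.2.1),
       (if PySem.Str.isIn "/v1/" path || PySem.Str.isIn "/api/" path then true else acc.2.2)))
    (false, false, false)
  let patterns : List String := []
  let patterns := if flags.1 then patterns ++ ["RESTful API"] else patterns
  let patterns := if flags.2.1 then patterns ++ ["CRUD Operations"] else patterns
  let patterns := if flags.2.2 then patterns ++ ["API Versioning"] else patterns
  patterns

-- ===== PRECONDITION & SPEC =====
def Spec_detect_api_patterns_py (endpoints : List (List (String × String))) (out : List String) : Prop := out = detect_api_patterns_py_alt endpoints
instance (endpoints : List (List (String × String))) (out : List String) : Decidable (Spec_detect_api_patterns_py endpoints out) := by unfold Spec_detect_api_patterns_py; infer_instance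

-- ===== CLAIM (what is proved, stated in full; the proofs are below) =====
def Claim_equal_detect_api_patterns_py : Prop := ∀ (endpoints : List (List (String × String))), Dom_detect_api_patterns_py endpoints → Spec_detect_api_patterns_py endpoints (detect_api_patterns_py endpoints)

-- ===== LEMMAS AND PROOFS =====

def pvRestP (ep : List (String × String)) : Bool :=
  let m := PySem.Dict.getD (PySem.Dict.mk ep) "method" ""
  m == "GET" || m == "POST" || m == "PUT" || m == "DELETE"

def pvCrudP (ep : List (String × String)) : Bool :=
  PySem.Str.isIn "/{id}" (PySem.Dict.getD (PySem.Dict.mk ep) "path" "")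

def pvVerP (ep : List (String × String)) : Bool :=
  PySem.Str.isIn "/v1/" (PySem.Dict.getD (PySem.Dict.mk ep) "path" "") ||
  PySem.Str.isIn "/api/" (PySem.Dict.getD (PySem.Dict.mk ep) "path" "")

theorem pvIfOr (c a x : Bool) : ((if c = true then true else a) || x) = (a || (c || x)) := by
  cases c <;> cases a <;> cases x <;> rfl

theorem pvFoldFlags (l : List (List (String × String))) (acc : Bool × Bool × Bool) :
    l.foldl
    (fun (acc : Bool × Bool × Bool) ep =>
      let method := PySem.Dict.getD (PySem.Dict.mk ep) "method" ""
      let path := PySem.Dict.getD (PySem.Dict.mk ep) "path" ""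
      ((if method == "GET" || method == "POST" || method == "PUT" || method == "DELETE"
          then true else acc.1),
       (if PySem.Str.isIn "/{id}" path then true else acc.2.1),
       (if PySem.Str.isIn "/v1/" path || PySem.Str.isIn "/api/" path then true else acc.2.2)))
    acc
    = (acc.1 || l.any pvRestP, acc.2.1 || l.any pvCrudP, acc.2.2 || l.any pvVerP) := by
  induction l generalizing acc with
  | nil => simp
  | cons ep t ih =>
    simp only [List.foldl_cons, List.any_cons, ih]
    obtain ⟨a, b, c⟩ := acc
    simp only [pvRestP, pvCrudP, pvVerP, Prod.mk.injEq]
    exact ⟨pvIfOr _ _ _, pvIfOr _ _ _, pvIfOr _ _ _⟩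

theorem pvCrud_eq (l : List (List (String × String))) :
    ((l.map (fun ep => PySem.Dict.getD (PySem.Dict.mk ep) "path" "")).any
      (fun p => PySem.Str.isIn "/{id}" p)) = l.any pvCrudP := by
  rw [List.any_map]; rfl

theorem pvVer_eq (l : List (List (String × String))) :
    ((l.map (fun ep => PySem.Dict.getD (PySem.Dict.mk ep) "path" "")).any
      (fun p => PySem.Str.isIn "/v1/" p || PySem.Str.isIn "/api/" p)) = l.any pvVerP := by
  rw [List.any_map]; rfl

theorem pvRest_eq (l : List (List (String × String))) :
    (["GET", "POST", "PUT", "DELETE"].any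
      (fun m => (l.map (fun ep => PySem.Dict.getD (PySem.Dict.mk ep) "method" "")).contains m))
    = l.any pvRestP := by
  have hb : ∀ (x y : Bool), (x = true ↔ y = true) → x = y := by decide
  apply hb
  simp only [List.any_eq_true, List.mem_cons, List.not_mem_nil, or_false,
    List.contains_iff_mem, List.mem_map, pvRestP, Bool.or_eq_true, beq_iff_eq]
  constructor
  · rintro ⟨m, hm, ep, hep, h⟩
    exact ⟨ep, hep, by rcases hm with h1|h1|h1|h1 <;> subst h1 <;> simp_all⟩
  · rintro ⟨ep, hep, h⟩
    rcases h with ((h|h)|h)|h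
    · exact ⟨"GET", by simp, ep, hep, h⟩
    · exact ⟨"POST", by simp, ep, hep, h⟩
    · exact ⟨"PUT", by simp, ep, hep, h⟩
    · exact ⟨"DELETE", by simp, ep, hep, h⟩

-- ===== VERDICT (by name: the statement is the Claim_ definition above) =====
theorem detect_api_patterns_py_spec : Claim_equal_detect_api_patterns_py := by
  intro endpoints _
  unfold Spec_detect_api_patterns_py detect_api_patterns_py detect_api_patterns_py_alt
  rw [pvFoldFlags]
  by_cases h : endpoints = []
  · subst h; simp
  · simp only [h, if_false, Bool.false_or]
    rw [pvRest_eq, pvCrud_eq, pvVer_eq]
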